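-- pv_equiv track=rewrite | github.com/frogtoss/palettetool | tools/vscode_extractor.py | clean_jsonc
-- ===== SOURCE A (Python) =====
-- def clean_jsonc(text: str) -> str:
--     """
--     Safely removes // line comments, /* block comments */, and trailing commas
--     from a JSON string without destroying URLs or string contents.
--     """
--     out = []
--     in_string = False
--     escape = False
--     i = 0
--     n = len(text)
--
--     # Pass 1: Remove Comments
--     while i < n:
--         c = text[i]
--         if not in_string:
--             if c == '/' and i + 1 < n and text[i+1] == '/':
--                 # Skip to end of line
--                 while i < n and text[i] != '\n':
--                     i += 1
--                 continue
--             elif c == '/' and i + 1 < n and text[i+1] == '*':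
--                 # Skip to end of block comment
--                 i += 2
--                 while i + 1 < n and not (text[i] == '*' and text[i+1] == '/'):
--                     i += 1
--                 i += 2
--                 continue
--             elif c == '"':
--                 in_string = True
--         else:
--             if c == '\\' and not escape:
--                 escape = True
--             else:
--                 if c == '"' and not escape:
--                     in_string = False
--                 escape = False
--
--         out.append(c)
--         i += 1
--
--     # Pass 2: Remove Trailing Commas
--     cleaned_str = "".join(out)
--     out2 = []
--     in_string = False
--     escape = False
--
--     i = 0
--     n = len(cleaned_str)
--     while i < n:
--         c = cleaned_str[i]
--         if not in_string:
--             if c == '"':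
--                 in_string = True
--                 out2.append(c)
--             elif c in ' \n\r\t':
--                 out2.append(c)
--             elif c in '}]':
--                 # Walk back and erase trailing comma if it exists
--                 j = len(out2) - 1
--                 while j >= 0 and out2[j] in ' \n\r\t':
--                     j -= 1
--                 if j >= 0 and out2[j] == ',':
--                     out2[j] = ' ' # Erase the trailing comma safely
--                 out2.append(c)
--             else:
--                 out2.append(c)
--         else:
--             if c == '\\' and not escape:
--                 escape = True
--             else:
--                 if c == '"' and not escape:
--                     in_string = False
--                 escape = False
--             out2.append(c)
--         i += 1
--
--     return "".join(out2)
-- ===== SOURCE B (Python) =====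
-- def clean_jsonc(text: str) -> str:
--     """Single fused pass: strips comments and trailing commas in one scan,
--     fixing a trailing comma in the output buffer whenever '}' or ']' is seen."""
--     out = []
--     in_string = False
--     escape = False
--     i = 0
--     n = len(text)
--     WS = " \n\r\t"
--     while i < n:
--         c = text[i]
--         if in_string:
--             if c == '\\' and not escape:
--                 escape = True
--             else:
--                 if c == '"' and not escape:
--                     in_string = False
--                 escape = False
--             out.append(c)
--             i += 1
--         elif c == '/' and text[i:i+2] == '//':
--             while i < n and text[i] != '\n':
--                 i += 1
--         elif c == '/' and text[i:i+2] == '/*':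
--             i += 2
--             while i + 1 < n and text[i:i+2] != '*/':
--                 i += 1
--             i += 2
--         else:
--             if c == '"':
--                 in_string = True
--             elif c in '}]':
--                 j = len(out) - 1
--                 while j >= 0 and out[j] in WS:
--                     j -= 1
--                 if j >= 0 and out[j] == ',':
--                     out[j] = ' '
--             out.append(c)
--             i += 1
--     return "".join(out)
-- ===== Notes on version B (the rewrite author's own statement) =====
-- stated objective: simpler
-- what changed: A's two sequential scans (strip comments into an intermediate string, then rescan it to erase trailing commas) are fused into one forward scan over the input with a single output buffer and no intermediate string.
import Mathlib
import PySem

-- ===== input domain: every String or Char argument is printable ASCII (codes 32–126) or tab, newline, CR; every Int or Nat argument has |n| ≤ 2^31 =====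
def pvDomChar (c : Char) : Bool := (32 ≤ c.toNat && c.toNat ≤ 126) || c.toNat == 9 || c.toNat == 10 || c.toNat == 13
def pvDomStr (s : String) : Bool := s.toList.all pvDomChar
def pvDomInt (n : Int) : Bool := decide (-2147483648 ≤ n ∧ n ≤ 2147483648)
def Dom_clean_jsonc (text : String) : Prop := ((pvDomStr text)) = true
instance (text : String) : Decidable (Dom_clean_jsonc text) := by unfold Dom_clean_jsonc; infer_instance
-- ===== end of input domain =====

-- B fuses A's two passes (comment stripping, then trailing-comma erasing) into one
-- scan with a single output buffer and no intermediate string: simpler, same cost class.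

-- ===== PORT A =====
-- A-side helpers: the two inner skip loops of pass 1.
-- Python: `while i < n and text[i] != '\n': i += 1` — stops at the '\n' (kept) or at end.
def pvSkipLine : List Char → List Char
  | [] => []
  | c :: r => if c = '\n' then c :: r else pvSkipLine r

-- Python: `while i + 1 < n and not (text[i] == '*' and text[i+1] == '/'): i += 1` —
-- stops when the next two chars are `*/` or fewer than two chars remain.
def pvSkipBlock : List Char → List Char
  | a :: b :: r => if a = '*' ∧ b = '/' then a :: b :: r else pvSkipBlock (b :: r)
  | l => l

lemma pvSkipLine_length_le (l : List Char) : (pvSkipLine l).length ≤ l.length := by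
  induction l with
  | nil => simp [pvSkipLine]
  | cons c r ih => simp only [pvSkipLine]; split <;> simp <;> omega

lemma pvSkipBlock_length_le (l : List Char) : (pvSkipBlock l).length ≤ l.length := by
  induction l using pvSkipBlock.induct with
  | case1 a b r h => simp only [pvSkipBlock]; rw [if_pos h]
  | case2 a b r h ih => simp only [pvSkipBlock]; rw [if_neg h]; simp at ih ⊢; omega
  | case3 l h =>
      cases l with
      | nil => exact le_of_eq rfl
      | cons a t =>
        cases t with
        | nil => exact le_of_eq rfl
        | cons b r => exact (h a b r rfl).elim

-- Pass 1 of A (comment removal), a transliteration of the index loop as recursion on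
-- the remaining input; state = (in_string, escape).  In the `//` case the Python skip
-- starts at the first '/', which is not '\n', so skipping from r is identical.
def pvPass1 (l : List Char) (s e : Bool) : List Char :=
  match l with
  | [] => []
  | c :: r =>
    if s then
      if c = '\\' ∧ e = false then c :: pvPass1 r true true
      else if c = '"' ∧ e = false then c :: pvPass1 r false false
      else c :: pvPass1 r true false
    else
      if c = '/' ∧ r.head? = some '/' then pvPass1 (pvSkipLine r) false e
      else if c = '/' ∧ r.head? = some '*' then pvPass1 ((pvSkipBlock r.tail).drop 2) false e
      else if c = '"' then c :: pvPass1 r true e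
      else c :: pvPass1 r false e
termination_by l.length
decreasing_by
  all_goals simp
  all_goals first
    | (have := pvSkipLine_length_le r; omega)
    | (have h1 := pvSkipBlock_length_le r.tail
       have h2 : r.tail.length ≤ r.length := by cases r with | nil => simp | cons x t => simp
       omega)

-- Python's backward walk `j -= 1` over trailing whitespace of out2, then
-- `out2[j] = ' '` if a comma is there; acc is kept reversed, so this works on the front.
def pvFixComma : List Char → List Char
  | [] => []
  | c :: r =>
    if c = ' ' ∨ c = '\n' ∨ c = '\r' ∨ c = '\t' then c :: pvFixComma r
    else if c = ',' then ' ' :: r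
    else c :: r

-- Pass 2 of A (trailing-comma removal); acc holds out2 reversed.
def pvPass2 (l : List Char) (s e : Bool) (acc : List Char) : List Char :=
  match l with
  | [] => acc
  | c :: r =>
    if s then
      if c = '\\' ∧ e = false then pvPass2 r true true (c :: acc)
      else if c = '"' ∧ e = false then pvPass2 r false false (c :: acc)
      else pvPass2 r true false (c :: acc)
    else
      if c = '"' then pvPass2 r true e (c :: acc)
      else if c = ' ' ∨ c = '\n' ∨ c = '\r' ∨ c = '\t' then pvPass2 r false e (c :: acc)
      else if c = '}' ∨ c = ']' then pvPass2 r false e (c :: pvFixComma acc)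
      else pvPass2 r false e (c :: acc)

def clean_jsonc (text : String) : String :=
  String.mk ((pvPass2 (pvPass1 text.toList false false) false false []).reverse)

-- ===== PORT B =====
-- B-side helpers: the same two inner skip loops, written for B's single pass.
def pvSkipLineB : List Char → List Char
  | [] => []
  | c :: r => if c = '\n' then c :: r else pvSkipLineB r

def pvSkipBlockB : List Char → List Char
  | a :: b :: r => if a = '*' ∧ b = '/' then a :: b :: r else pvSkipBlockB (b :: r)
  | l => l

lemma pvSkipLineB_length_le (l : List Char) : (pvSkipLineB l).length ≤ l.length := by
  induction l with
  | nil => simp [pvSkipLineB]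
  | cons c r ih => simp only [pvSkipLineB]; split <;> simp <;> omega

lemma pvSkipBlockB_length_le (l : List Char) : (pvSkipBlockB l).length ≤ l.length := by
  induction l using pvSkipBlockB.induct with
  | case1 a b r h => simp only [pvSkipBlockB]; rw [if_pos h]
  | case2 a b r h ih => simp only [pvSkipBlockB]; rw [if_neg h]; simp at ih ⊢; omega
  | case3 l h =>
      cases l with
      | nil => exact le_of_eq rfl
      | cons a t =>
        cases t with
        | nil => exact le_of_eq rfl
        | cons b r => exact (h a b r rfl).elim

-- B's backward walk over the single output buffer (kept reversed).
def pvFixCommaB : List Char → List Char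
  | [] => []
  | c :: r =>
    if c = ' ' ∨ c = '\n' ∨ c = '\r' ∨ c = '\t' then c :: pvFixCommaB r
    else if c = ',' then ' ' :: r
    else c :: r

-- B's single fused loop: branch order as in Source B (in_string first, then the two
-- comment forms, then the quote / bracket / default appends).
def pvFused (l : List Char) (s e : Bool) (acc : List Char) : List Char :=
  match l with
  | [] => acc
  | c :: r =>
    if s then
      if c = '\\' ∧ e = false then pvFused r true true (c :: acc)
      else if c = '"' ∧ e = false then pvFused r false false (c :: acc)
      else pvFused r true false (c :: acc)
    else if c = '/' ∧ r.head? = some '/' then pvFused (pvSkipLineB r) false e acc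
    else if c = '/' ∧ r.head? = some '*' then pvFused ((pvSkipBlockB r.tail).drop 2) false e acc
    else if c = '"' then pvFused r true e (c :: acc)
    else if c = '}' ∨ c = ']' then pvFused r false e (c :: pvFixCommaB acc)
    else pvFused r false e (c :: acc)
termination_by l.length
decreasing_by
  all_goals simp
  all_goals first
    | (have := pvSkipLineB_length_le r; omega)
    | (have h1 := pvSkipBlockB_length_le r.tail
       have h2 : r.tail.length ≤ r.length := by cases r with | nil => simp | cons x t => simp
       omega)

def clean_jsonc_alt (text : String) : String :=
  String.mk ((pvFused text.toList false false []).reverse)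

-- ===== PRECONDITION & SPEC =====
def Spec_clean_jsonc (text : String) (out : String) : Prop := out = clean_jsonc_alt text
instance (text : String) (out : String) : Decidable (Spec_clean_jsonc text out) := by unfold Spec_clean_jsonc; infer_instance

-- ===== CLAIM (what is proved, stated in full; the proofs are below) =====
def Claim_equal_clean_jsonc : Prop := ∀ (text : String), Dom_clean_jsonc text → Spec_clean_jsonc text (clean_jsonc text)

-- ===== LEMMAS AND PROOFS =====

lemma pvSkipLineB_eq (l : List Char) : pvSkipLineB l = pvSkipLine l := by
  induction l with
  | nil => rfl
  | cons c r ih => simp only [pvSkipLineB, pvSkipLine]; split <;> simp_all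

lemma pvSkipBlockB_eq (l : List Char) : pvSkipBlockB l = pvSkipBlock l := by
  induction l using pvSkipBlockB.induct with
  | case1 a b r h => simp only [pvSkipBlockB, pvSkipBlock]; rw [if_pos h, if_pos h]
  | case2 a b r h ih => simp only [pvSkipBlockB, pvSkipBlock]; rw [if_neg h, if_neg h]; exact ih
  | case3 l h =>
      cases l with
      | nil => rfl
      | cons a t =>
        cases t with
        | nil => rfl
        | cons b r => exact (h a b r rfl).elim

lemma pvFixCommaB_eq (l : List Char) : pvFixCommaB l = pvFixComma l := by
  induction l with
  | nil => rfl
  | cons c r ih => simp only [pvFixCommaB, pvFixComma]; split <;> simp_all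

-- Fusion law: B's single pass computes pass 2 applied to pass 1's output, for any
-- shared starting state (s, e) and any accumulator.
lemma pvFused_eq_pass2_pass1 :
    ∀ (n : ℕ) (l : List Char), l.length ≤ n → ∀ (s e : Bool) (acc : List Char),
      pvFused l s e acc = pvPass2 (pvPass1 l s e) s e acc := by
  intro n
  induction n with
  | zero =>
      intro l hl s e acc
      have hln : l = [] := List.eq_nil_of_length_eq_zero (Nat.le_zero.mp hl)
      subst hln; simp only [pvFused, pvPass1, pvPass2]
  | succ n ih =>
      intro l hl s e acc
      cases l with
      | nil => simp only [pvFused, pvPass1, pvPass2]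
      | cons c r =>
        have hr : r.length ≤ n := by simp at hl; omega
        cases s with
        | true =>
            simp only [pvFused, pvPass1, if_true]
            split_ifs with h1 h2
            · rw [ih r hr]; simp only [pvPass2, if_true]; rw [if_pos h1]
            · rw [ih r hr]; simp only [pvPass2, if_true]; rw [if_neg h1, if_pos h2]
            · rw [ih r hr]; simp only [pvPass2, if_true]; rw [if_neg h1, if_neg h2]
        | false =>
            simp only [pvFused, pvPass1, Bool.false_eq_true, if_false]
            split_ifs with hc1 hc2 hq hb
            · -- line comment
              have hlen : (pvSkipLineB r).length ≤ n := by
                have := pvSkipLineB_length_le r; omega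
              rw [ih _ hlen, pvSkipLineB_eq]
            · -- block comment
              have hlen : ((pvSkipBlockB r.tail).drop 2).length ≤ n := by
                have h1 := pvSkipBlockB_length_le r.tail
                have h2 : r.tail.length ≤ r.length := by
                  cases r with | nil => simp | cons x t => simp
                have h3 := List.length_drop (l := pvSkipBlockB r.tail) (i := 2)
                omega
              rw [ih _ hlen, pvSkipBlockB_eq]
            · -- opening quote
              rw [ih r hr]
              simp only [pvPass2, Bool.false_eq_true, if_false]
              rw [if_pos hq]
            · -- closing bracket: fix a trailing comma
              rw [ih r hr, pvFixCommaB_eq]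
              simp only [pvPass2, Bool.false_eq_true, if_false]
              have hnq : ¬ c = '"' := hq
              have hnw : ¬ (c = ' ' ∨ c = '\n' ∨ c = '\r' ∨ c = '\t') := by
                rcases hb with hb | hb <;> subst hb <;> decide
              rw [if_neg hnq, if_neg hnw, if_pos hb]
            · -- plain character (whitespace or other): both sides just append
              rw [ih r hr]
              simp only [pvPass2, Bool.false_eq_true, if_false]
              rw [if_neg hq]
              by_cases hw : (c = ' ' ∨ c = '\n' ∨ c = '\r' ∨ c = '\t')
              · rw [if_pos hw]
              · rw [if_neg hw, if_neg hb]

theorem clean_jsonc_spec_aux (text : String) : clean_jsonc text = clean_jsonc_alt text := by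
  have h := pvFused_eq_pass2_pass1 text.toList.length text.toList le_rfl false false []
  simp [clean_jsonc, clean_jsonc_alt, h]

-- ===== VERDICT (by name: the statement is the Claim_ definition above) =====
theorem clean_jsonc_spec : Claim_equal_clean_jsonc := by
  intro text _
  unfold Spec_clean_jsonc
  exact clean_jsonc_spec_aux text
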